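-- pv_equiv track=rewrite | github.com/MrBrantCode/unitest_baseline | mut_generate/mist_train_cf/cf_14650/solution.py | replace_odd_chars
-- ===== SOURCE A (Python) =====
-- def replace_odd_chars(string):
--     if len(string) > 100:
--         return "Error: String exceeds maximum length of 100 characters"
--
--     modified_string = ''
--     for i in range(len(string)):
--         if i % 2 != 0:
--             modified_string += '#'
--         else:
--             modified_string += string[i]
--
--     return modified_string
-- ===== SOURCE B (Python) =====
-- def replace_odd_chars(string):
--     if len(string) > 100:
--         return "Error: String exceeds maximum length of 100 characters"
--     chars = list(string)
--     chars[1::2] = '#' * len(chars[1::2])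
--     return ''.join(chars)
-- ===== Notes on version B (the rewrite author's own statement) =====
-- stated objective: idiomatic
-- what changed: Replaces the per-index loop with its parity test and string concatenation by a wholesale strided slice assignment chars[1::2] = '#'*k over a list copy, joined once.
import Mathlib
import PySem

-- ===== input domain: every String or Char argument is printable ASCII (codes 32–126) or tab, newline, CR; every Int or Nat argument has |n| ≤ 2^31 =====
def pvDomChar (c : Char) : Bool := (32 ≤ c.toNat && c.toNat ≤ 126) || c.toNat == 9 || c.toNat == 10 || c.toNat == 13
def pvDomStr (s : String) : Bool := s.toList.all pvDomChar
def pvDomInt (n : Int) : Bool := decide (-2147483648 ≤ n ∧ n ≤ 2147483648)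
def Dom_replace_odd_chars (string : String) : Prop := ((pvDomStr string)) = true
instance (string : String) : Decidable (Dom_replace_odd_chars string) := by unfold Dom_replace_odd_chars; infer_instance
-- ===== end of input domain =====

-- B replaces A's per-index loop (parity test + string concatenation) by a strided
-- slice assignment over a list copy, joined once; same return value everywhere.

-- ===== PORT A =====
-- string[i] for i in range(len(string)): always in range, so the pyGetD default ' ' is unreachable.
def replace_odd_chars (string : String) : String :=
  let cs := string.toList
  if cs.length > 100 then "Error: String exceeds maximum length of 100 characters"
  else
    String.ofList ((PySem.List.pyRange 0 cs.length 1).foldl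
      (fun acc i => if i % 2 ≠ 0 then acc ++ ['#'] else acc ++ [PySem.List.pyGetD cs i ' ']) [])

-- ===== PORT B =====
-- chars[1::2] = '#' * k : overwrite every odd position, transcribed as a pairwise walk.
def pvAssignOddsHash : List Char → List Char
  | [] => []
  | [a] => [a]
  | a :: _ :: rest => a :: '#' :: pvAssignOddsHash rest

def replace_odd_chars_alt (string : String) : String :=
  let chars := string.toList
  if chars.length > 100 then "Error: String exceeds maximum length of 100 characters"
  else String.ofList (pvAssignOddsHash chars)

-- ===== PRECONDITION & SPEC =====
def Spec_replace_odd_chars (string : String) (out : String) : Prop := out = replace_odd_chars_alt string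
instance (string : String) (out : String) : Decidable (Spec_replace_odd_chars string out) := by unfold Spec_replace_odd_chars; infer_instance

-- ===== CLAIM (what is proved, stated in full; the proofs are below) =====
def Claim_equal_replace_odd_chars : Prop := ∀ (string : String), Dom_replace_odd_chars string → Spec_replace_odd_chars string (replace_odd_chars string)

-- ===== LEMMAS AND PROOFS =====

lemma enum_map_eq_assign (cs : List Char) : ∀ (s : Int), s % 2 = 0 →
    (PySem.List.enumerate cs s).map (fun p => if p.1 % 2 ≠ 0 then '#' else p.2)
      = pvAssignOddsHash cs := by
  induction cs using pvAssignOddsHash.induct with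
  | case1 => intro s _; simp [PySem.List.enumerate_nil, pvAssignOddsHash]
  | case2 a =>
    intro s hs
    simp [PySem.List.enumerate_cons, PySem.List.enumerate_nil, pvAssignOddsHash, hs]
  | case3 a b rest ih =>
    intro s hs
    have h1 : (s + 1) % 2 ≠ 0 := by omega
    rw [PySem.List.enumerate_cons, PySem.List.enumerate_cons, List.map_cons, List.map_cons,
      ih (s + 1 + 1) (by omega)]
    show _ :: _ :: _ = a :: '#' :: pvAssignOddsHash rest
    simp [hs, h1]

lemma fold_eq_assign (cs : List Char) :
    (PySem.List.pyRange 0 cs.length 1).foldl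
      (fun acc i => if i % 2 ≠ 0 then acc ++ ['#'] else acc ++ [PySem.List.pyGetD cs i ' ']) []
      = pvAssignOddsHash cs := by
  have h := enum_map_eq_assign cs 0 (by decide)
  rw [PySem.List.enumerate_eq_map_pyRange cs ' ', List.map_map] at h
  have hc : (PySem.List.pyRange 0 cs.length 1).foldl
      (fun acc i => if i % 2 ≠ 0 then acc ++ ['#'] else acc ++ [PySem.List.pyGetD cs i ' ']) []
      = (PySem.List.pyRange 0 cs.length 1).foldl
      (fun acc i => acc ++ [if i % 2 ≠ 0 then '#' else PySem.List.pyGetD cs i ' ']) [] := by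
    apply PySem.List.foldl_congr_mem
    intro acc x _
    split <;> simp_all
  rw [hc, PySem.List.foldl_append_singleton_eq_map, List.nil_append]
  simpa [PySem.List.len, Function.comp] using h

-- ===== VERDICT (by name: the statement is the Claim_ definition above) =====
theorem replace_odd_chars_spec : Claim_equal_replace_odd_chars := by
  intro s _
  unfold Spec_replace_odd_chars replace_odd_chars replace_odd_chars_alt
  simp only []
  split
  · rfl
  · rw [fold_eq_assign]
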